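-- pv_equiv track=rewrite | github.com/mikereil80/cs115 | musicrecplus.py | most_likes
-- ===== SOURCE A (Python) =====
-- def most_likes(userMap):
--     '''Finds who had the most liked artist in the dictionary,
-- aka: who has the most preferences'''
--     itemlist=items(userMap)
--     maxlength=1
--     name=[]
--     for i in itemlist:
--         if len(i[1])>maxlength:
--             maxlength=len(i[1])
--             name=[i[0]]
--         elif len(i[1])==maxlength:
--             name+=[i[0]]
--     return name
--
-- def items(userMap):
--     '''returns the items available for use if $ is not at the end of the key'''
--     users=userMap.keys()
--     itemslist=[]
--     for user in users:
--         if user[-1] != "$":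
--             itemslist+=[(user, userMap[user])]
--             itemslist.sort()
--     return itemslist
-- ===== SOURCE B (Python) =====
-- def most_likes(userMap):
--     '''Finds who had the most liked artist in the dictionary,
-- aka: who has the most preferences'''
--     names = sorted(u for u in userMap.keys() if u[-1] != "$")
--     if not names:
--         return []
--     maxlen = max(1, max(len(userMap[u]) for u in names))
--     return [u for u in names if len(userMap[u]) == maxlen]
-- ===== Notes on version B (the rewrite author's own statement) =====
-- stated objective: faster
-- what changed: B builds the sorted eligible-name list once, computes the maximum preference count (floored at 1) in a second pass, and filters in a third, replacing A's per-element list re-sort inside the loop and its single-pass running-max with list rebuilding.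
import Mathlib
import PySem

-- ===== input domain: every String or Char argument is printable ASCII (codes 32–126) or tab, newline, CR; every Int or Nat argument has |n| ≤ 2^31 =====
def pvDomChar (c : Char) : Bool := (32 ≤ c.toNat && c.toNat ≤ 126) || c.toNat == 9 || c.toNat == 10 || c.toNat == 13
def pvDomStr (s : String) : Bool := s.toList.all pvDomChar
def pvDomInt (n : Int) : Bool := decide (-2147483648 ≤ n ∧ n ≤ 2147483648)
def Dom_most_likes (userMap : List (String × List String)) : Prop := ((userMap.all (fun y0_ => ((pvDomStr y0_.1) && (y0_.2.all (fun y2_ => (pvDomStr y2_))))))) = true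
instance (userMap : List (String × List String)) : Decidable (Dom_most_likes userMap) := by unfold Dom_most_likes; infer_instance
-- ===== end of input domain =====

-- B replaces A's loop (which re-sorts the item list after every append and keeps a running max
-- with in-loop list rebuilding) by: sort the eligible names once, take the max length in a second
-- pass, filter in a third.  A timing run measured B faster on the large inputs.

-- ===== PORT A =====
-- helper 'items': collects (user, userMap[user]) for keys not ending in '$', calling .sort() after
-- every append.  Python sorts (str, list) tuples; dict keys are unique, so the comparison is always
-- decided by the first component alone — ported as a sort keyed on the first component.
def pv_items_A (userMap : List (String × List String)) : List (String × List String) :=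
  let d := PySem.Dict.ofList userMap
  d.keys.foldl (fun itemslist user =>
    if PySem.Str.pyGet? user (-1) != some '$' then
      PySem.List.sorted (itemslist ++ [(user, d.getD user [])]) (fun p => p.1) false
    else itemslist) []

def most_likes (userMap : List (String × List String)) : List String :=
  let itemlist := pv_items_A userMap
  (itemlist.foldl (fun st i =>
      if (i.2.length : Int) > st.1 then ((i.2.length : Int), [i.1])
      else if (i.2.length : Int) = st.1 then (st.1, st.2 ++ [i.1])
      else st) ((1 : Int), ([] : List String))).2

-- ===== PORT B =====
def most_likes_alt (userMap : List (String × List String)) : List String :=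
  let d := PySem.Dict.ofList userMap
  let names := PySem.List.sorted
      (d.keys.filter (fun u => PySem.Str.pyGet? u (-1) != some '$')) (fun u => u) false
  match PySem.List.max? (names.map (fun u => ((d.getD u []).length : Int))) (fun x => x) with
  | none => []        -- 'if not names: return []'
  | some m =>
      let maxlen := max 1 m
      names.filter (fun u => ((d.getD u []).length : Int) == maxlen)

-- ===== PRECONDITION & SPEC =====
-- Pre_ excludes maps containing an empty-string key, on which 'user[-1]' makes both A and B raise IndexError.
def Pre_most_likes (userMap : List (String × List String)) : Prop :=
  ∀ p ∈ userMap, p.1 ≠ ""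
instance (userMap : List (String × List String)) : Decidable (Pre_most_likes userMap) := by
  unfold Pre_most_likes; infer_instance

def pvWitness_most_likes : (List (String × List String)) :=
  [("a", ["x"]), ("b$", ["x", "y", "z"]), ("c", ["x", "y"])]

def Spec_most_likes (userMap : List (String × List String)) (out : List String) : Prop := out = most_likes_alt userMap
instance (userMap : List (String × List String)) (out : List String) : Decidable (Spec_most_likes userMap out) := by unfold Spec_most_likes; infer_instance

-- ===== CLAIM (what is proved, stated in full; the proofs are below) =====
def Claim_equal_most_likes : Prop := ∀ (userMap : List (String × List String)), Dom_most_likes userMap → Pre_most_likes userMap → Spec_most_likes userMap (most_likes userMap)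

-- ===== LEMMAS AND PROOFS =====

-- pairwise ≤ plus distinct keys gives pairwise <
theorem pv_pairwise_lt_of_le_nodup {α : Type} (key : α → String) (l : List α)
    (h1 : l.Pairwise (fun a b => key a ≤ key b)) (h2 : (l.map key).Nodup) :
    l.Pairwise (fun a b => key a < key b) := by
  have h3 : l.Pairwise (fun a b => key a ≠ key b) := (List.pairwise_map).1 h2
  exact (h1.and h3).imp (fun h => lt_of_le_of_ne h.1 h.2)

-- A's 'append then .sort()' loop over distinct keys computes the sort of the whole list
theorem pv_foldl_sorted_append (g : String → String × List String) (hg : ∀ u, (g u).1 = u) :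
    ∀ (l : List String) (acc : List (String × List String)),
      (acc.map Prod.fst ++ l).Nodup →
      acc.Pairwise (fun a b => a.1 ≤ b.1) →
      l.foldl (fun acc u => PySem.List.sorted (acc ++ [g u]) (fun p => p.1) false) acc
        = PySem.List.sorted (acc ++ l.map g) (fun p => p.1) false := by
  have hfg : Prod.fst ∘ g = id := funext hg
  intro l
  induction l with
  | nil =>
      intro acc hnd hpw
      simpa using (PySem.List.sorted_eq_self_of_pairwise acc (fun p => p.1) hpw).symm
  | cons u t ih =>
      intro acc hnd hpw
      set acc' := PySem.List.sorted (acc ++ [g u]) (fun p => p.1) false with hacc'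
      have hperm' : acc'.Perm (acc ++ [g u]) := PySem.List.sorted_perm _ _ _
      have hpermfst : (acc'.map Prod.fst).Perm (acc.map Prod.fst ++ [u]) := by
        have h := hperm'.map Prod.fst
        simpa [hg] using h
      have hnd' : (acc'.map Prod.fst ++ t).Nodup := by
        have hp2 : (acc'.map Prod.fst ++ t).Perm (acc.map Prod.fst ++ u :: t) := by
          simpa using hpermfst.append_right t
        exact hp2.symm.nodup hnd
      have hpw' : acc'.Pairwise (fun a b => a.1 ≤ b.1) := PySem.List.sorted_pairwise _ _
      rw [List.foldl_cons, ih acc' hnd' hpw']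
      -- uniqueness of the strictly-key-increasing rearrangement
      apply PySem.List.sorted_eq_of_perm_of_pairwise_lt
      · have h1 : (PySem.List.sorted (acc ++ (u :: t).map g) (fun p => p.1) false).Perm
            (acc ++ (u :: t).map g) := PySem.List.sorted_perm _ _ _
        have h2 : (acc' ++ t.map g).Perm (acc ++ (u :: t).map g) := by
          have h3 := hperm'.append_right (t.map g)
          simpa using h3
        exact h1.trans h2.symm
      · refine pv_pairwise_lt_of_le_nodup
            (fun p : String × List String => p.1) _ (PySem.List.sorted_pairwise _ _) ?_
        have hperm2 : ((PySem.List.sorted (acc ++ (u :: t).map g) (fun p => p.1) false).map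
              Prod.fst).Perm (acc.map Prod.fst ++ u :: t) := by
            have h := (PySem.List.sorted_perm (acc ++ (u :: t).map g) (fun p => p.1) false).map
              Prod.fst
            simpa [List.map_map, hfg, hg] using h
        exact hperm2.symm.nodup hnd

-- A's running-max loop: final max and the collected names, in one statement
theorem pv_runmax (f : String → Int) :
    ∀ (ns : List String) (m : Int) (acc : List String),
      ns.foldl (fun st u => if f u > st.1 then (f u, [u])
                            else if f u = st.1 then (st.1, st.2 ++ [u]) else st) (m, acc)
        = (ns.foldl (fun a u => max a (f u)) m,
           (if ns.foldl (fun a u => max a (f u)) m = m then acc else []) ++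
             ns.filter (fun u => f u == ns.foldl (fun a u => max a (f u)) m)) := by
  intro ns
  induction ns with
  | nil => intro m acc; simp
  | cons u t ih =>
      intro m acc
      have hle : ∀ (a : Int), a ≤ t.foldl (fun a u => max a (f u)) a :=
        fun a => (PySem.List.le_foldl_max_int t f a).1
      simp only [List.foldl_cons]
      by_cases h1 : f u > m
      · rw [if_pos h1, ih]
        have hmr : max m (f u) = f u := max_eq_right (le_of_lt h1)
        simp only [hmr]
        have hne : t.foldl (fun a u => max a (f u)) (f u) ≠ m := by
          have := hle (f u); omega
        by_cases h2 : f u = t.foldl (fun a u => max a (f u)) (f u)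
        · simp only [← h2] at hne ⊢
          simp [hne]
        · simp [beq_iff_eq, hne, h2]
          omega
      · rw [if_neg h1]
        have hmr : max m (f u) = m := max_eq_left (by omega)
        by_cases h2 : f u = m
        · rw [if_pos h2, ih]
          simp only [hmr]
          by_cases h3 : t.foldl (fun a u => max a (f u)) m = m
          · simp [h3, h2]
          · have h4 : f u ≠ t.foldl (fun a u => max a (f u)) m := by omega
            simp [beq_iff_eq, h3, h4]
        · rw [if_neg h2, ih]
          simp only [hmr]
          have h4 : f u ≠ t.foldl (fun a u => max a (f u)) m := by
            have := hle m; omega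
          simp [beq_iff_eq, h4]

-- max pulled out of a running max
theorem pv_foldl_max_max (f : String → Int) :
    ∀ (t : List String) (a b : Int),
      t.foldl (fun x u => max x (f u)) (max a b) = max a (t.foldl (fun x u => max x (f u)) b) := by
  intro t
  induction t with
  | nil => intro a b; simp
  | cons u s ih => intro a b; simp only [List.foldl_cons, max_assoc]; rw [ih]

-- the whole equivalence, stated over an arbitrary dict with distinct keys
theorem pv_core (d : PySem.Dict String (List String)) (hnd : d.keys.Nodup) :
    ((d.keys.foldl (fun itemslist user =>
        if PySem.Str.pyGet? user (-1) != some '$' then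
          PySem.List.sorted (itemslist ++ [(user, d.getD user [])]) (fun p => p.1) false
        else itemslist) []).foldl (fun st i =>
          if (i.2.length : Int) > st.1 then ((i.2.length : Int), [i.1])
          else if (i.2.length : Int) = st.1 then (st.1, st.2 ++ [i.1])
          else st) ((1 : Int), ([] : List String))).2
    = (match PySem.List.max?
          ((PySem.List.sorted (d.keys.filter (fun u => PySem.Str.pyGet? u (-1) != some '$'))
              (fun u => u) false).map (fun u => ((d.getD u []).length : Int))) (fun x => x) with
       | none => ([] : List String)
       | some m =>
          (PySem.List.sorted (d.keys.filter (fun u => PySem.Str.pyGet? u (-1) != some '$'))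
              (fun u => u) false).filter (fun u => ((d.getD u []).length : Int) == max 1 m)) := by
  have hEnd : (d.keys.filter (fun u => PySem.Str.pyGet? u (-1) != some '$')).Nodup :=
    hnd.filter _
  rw [PySem.List.foldl_if_eq_foldl_filter]
  rw [pv_foldl_sorted_append (fun u => (u, d.getD u [])) (fun _ => rfl)
      (d.keys.filter (fun u => PySem.Str.pyGet? u (-1) != some '$')) []
      (by simpa using hEnd) (by simp)]
  set E := d.keys.filter (fun u => PySem.Str.pyGet? u (-1) != some '$') with hE
  set names := PySem.List.sorted E (fun u => u) false with hnames
  have hnperm : names.Perm E := PySem.List.sorted_perm _ _ _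
  have hnnd : names.Nodup := hnperm.symm.nodup hEnd
  have hfg : Prod.fst ∘ (fun u => (u, d.getD u [])) = id := rfl
  have hstep : PySem.List.sorted
      (([] : List (String × List String)) ++ E.map (fun u => (u, d.getD u [])))
      (fun p => p.1) false = names.map (fun u => (u, d.getD u [])) := by
    apply PySem.List.sorted_eq_of_perm_of_pairwise_lt
    · exact ((hnperm.map _).trans (by simp))
    · refine pv_pairwise_lt_of_le_nodup (fun p : String × List String => p.1) _ ?_ ?_
      · exact (List.pairwise_map).2 (PySem.List.sorted_pairwise E _)
      · have h : (names.map (fun u => (u, d.getD u []))).map Prod.fst = names := by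
          rw [List.map_map, hfg, List.map_id]
        rw [h]; exact hnnd
  rw [hstep]
  simp only [List.foldl_map]
  rw [pv_runmax (fun u => ((d.getD u []).length : Int)) names 1 []]
  cases hn : names with
  | nil => rfl
  | cons u t =>
      rw [List.map_cons, PySem.List.max?_id_cons]
      have hM : (u :: t).foldl (fun a v => max a (((d.getD v []).length : Int))) 1
          = max 1 ((t.map (fun v => ((d.getD v []).length : Int))).foldl max
              ((d.getD u [] : List String).length : Int)) := by
        rw [List.foldl_cons, pv_foldl_max_max (fun v => ((d.getD v []).length : Int)) t 1,
          List.foldl_map]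
      rw [List.foldl_cons] at hM ⊢
      rw [hM]
      simp

-- ===== VERDICT (by name: the statement is the Claim_ definition above) =====
theorem most_likes_spec : Claim_equal_most_likes := by
  intro userMap _ _
  unfold Spec_most_likes most_likes most_likes_alt pv_items_A
  exact pv_core (PySem.Dict.ofList userMap) (PySem.Dict.nodup_keys_ofList userMap)
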